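-- pv_equiv track=rewrite | github.com/Murmur-ops/RadarSimPublic | src/tracking/association.py | _generate_association_hypotheses
-- ===== SOURCE A (Python) =====
-- from typing import List, Dict, Tuple, Optional, Set, Union
-- from collections import defaultdict
-- import itertools
--
-- def _generate_association_hypotheses(n_tracks: int, n_detections: int,
--                                    valid_pairs: List[Tuple[int, int]]) -> List[Dict]:
--     """
--     Generate all feasible association hypotheses.
--
--     Args:
--         n_tracks: Number of tracks
--         n_detections: Number of detections
--         valid_pairs: List of valid (track_id, detection_id) pairs
--
--     Returns:
--         List of association hypotheses
--     """
--     hypotheses = []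
--
--     # Group valid pairs by track
--     track_detections = defaultdict(list)
--     for track_id, detection_id in valid_pairs:
--         track_detections[track_id].append(detection_id)
--
--     # Add "no detection" option for each track
--     for track_id in range(n_tracks):
--         track_detections[track_id].append(-1)  # -1 represents no detection
--
--     # Generate all combinations
--     track_options = []
--     for track_id in range(n_tracks):
--         track_options.append(track_detections[track_id])
--
--     # Generate Cartesian product of all track options
--     for combination in itertools.product(*track_options):
--         hypothesis = {track_id: detection_id
--                      for track_id, detection_id in enumerate(combination)}
--
--         # Check if hypothesis is feasible (no detection assigned to multiple tracks)
--         assigned_detections = [d for d in hypothesis.values() if d != -1]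
--         if len(assigned_detections) == len(set(assigned_detections)):
--             hypotheses.append(hypothesis)
--
--     return hypotheses
-- ===== SOURCE B (Python) =====
-- from typing import List, Dict, Tuple
--
--
-- def _generate_association_hypotheses(n_tracks: int, n_detections: int,
--                                    valid_pairs: List[Tuple[int, int]]) -> List[Dict]:
--     """Pruned suffix sweep instead of filtering the full Cartesian product: walk
--     the tracks back to front, keeping only partial assignments that never reuse
--     a detection; partial assignments are shared cons-lists ((track, det), rest)."""
--     groups = {}
--     for track_id, detection_id in valid_pairs:
--         groups.setdefault(track_id, []).append(detection_id)
--     options = [groups.get(t, []) + [-1] for t in range(n_tracks)]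
--
--     suffixes = [(None, set())]
--     for i, opts in reversed(list(enumerate(options))):
--         suffixes = [(((i, d), p), s if d == -1 else s | {d})
--                     for d in opts
--                     for (p, s) in suffixes
--                     if d == -1 or d not in s]
--
--     out = []
--     for p, _ in suffixes:
--         h = {}
--         while p is not None:
--             (t, d), p = p
--             h[t] = d
--         out.append(h)
--     return out
-- ===== Notes on version B (the rewrite author's own statement) =====
-- stated objective: alternative
-- what changed: Replaces enumerating the full Cartesian product of per-track options and filtering each combination for detection reuse by a back-to-front suffix sweep over the tracks that keeps only partial assignments never reusing a detection (shared cons-list partials).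
import Mathlib
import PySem

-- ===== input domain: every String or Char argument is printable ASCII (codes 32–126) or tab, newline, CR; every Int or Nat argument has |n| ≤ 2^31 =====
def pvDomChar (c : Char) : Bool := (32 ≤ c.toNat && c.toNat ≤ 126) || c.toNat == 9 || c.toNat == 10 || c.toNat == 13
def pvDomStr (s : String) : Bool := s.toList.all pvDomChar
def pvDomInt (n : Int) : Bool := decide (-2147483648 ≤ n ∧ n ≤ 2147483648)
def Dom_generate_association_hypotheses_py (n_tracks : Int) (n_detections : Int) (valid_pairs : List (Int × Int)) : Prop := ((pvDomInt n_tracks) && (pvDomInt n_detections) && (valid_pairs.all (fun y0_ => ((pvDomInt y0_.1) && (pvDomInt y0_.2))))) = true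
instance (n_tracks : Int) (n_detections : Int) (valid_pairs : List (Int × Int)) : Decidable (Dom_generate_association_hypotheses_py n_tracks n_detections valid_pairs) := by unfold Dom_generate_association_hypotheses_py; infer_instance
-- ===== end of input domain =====

-- B replaces A's full-Cartesian-product enumeration + feasibility filter by a back-to-front
-- suffix sweep that prunes partial assignments reusing a detection (alternative algorithm).

-- ===== PORT A =====
-- itertools.product(*track_options), ported structurally (first factor varies slowest)
def pvProd : List (List Int) → List (List Int)
  | [] => [[]]
  | o :: os => o.flatMap (fun d => (pvProd os).map (fun c => d :: c))

def generate_association_hypotheses_py (n_tracks : Int) (n_detections : Int) (valid_pairs : List (Int × Int)) : List (List (Int × Int)) :=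
  -- track_detections = defaultdict(list); append detection_id per pair
  let td := valid_pairs.foldl (fun d p => d.modify p.1 [] (fun l => l ++ [p.2])) (PySem.Dict.empty : PySem.Dict Int (List Int))
  -- append -1 ("no detection") for each track in range(n_tracks)
  let td2 := (PySem.List.pyRange 0 n_tracks 1).foldl (fun d t => d.modify t [] (fun l => l ++ [(-1 : Int)])) td
  -- track_options built by appending in a loop
  let track_options := (PySem.List.pyRange 0 n_tracks 1).foldl (fun acc t => acc ++ [td2.getD t []]) []
  -- for combination in product(*track_options): build dict, filter feasible, append
  (pvProd track_options).foldl (fun hyps c =>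
    let hyp := PySem.Dict.ofList (PySem.List.enumerate c 0)
    let assigned := hyp.values.filter (fun d => d != -1)
    if assigned.length = (PySem.Set.ofList assigned).length then hyps ++ [hyp.items] else hyps) []

-- ===== PORT B =====
-- one level of Source B's sweep: extend every kept suffix by an allowed option d for track i
-- (the comprehension '[... for d in opts for (p, s) in suffixes if d == -1 or d not in s]';
--  the Python cons-pair ((i, d), p) is the Lean cons (i, d) :: q.1)
def pvLevel (suffixes : List (List (Int × Int) × PySem.Set Int)) (io : Int × List Int) :
    List (List (Int × Int) × PySem.Set Int) :=
  io.2.flatMap (fun d =>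
    (suffixes.filter (fun q => d == -1 || !(PySem.Set.contains q.2 d))).map
      (fun q => ((io.1, d) :: q.1, if d == -1 then q.2 else PySem.Set.add q.2 d)))

def generate_association_hypotheses_py_alt (n_tracks : Int) (n_detections : Int) (valid_pairs : List (Int × Int)) : List (List (Int × Int)) :=
  let groups := valid_pairs.foldl (fun d p => d.modify p.1 [] (fun l => l ++ [p.2])) (PySem.Dict.empty : PySem.Dict Int (List Int))
  let options := (PySem.List.pyRange 0 n_tracks 1).map (fun t => groups.getD t [] ++ [(-1 : Int)])
  -- for i, opts in reversed(list(enumerate(options))): suffixes = [...]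
  let suffixes := ((PySem.List.enumerate options 0).reverse).foldl pvLevel [([], PySem.Set.empty)]
  -- walk each shared cons-list front to back, building the dict
  suffixes.foldl (fun out q =>
    out ++ [(q.1.foldl (fun h td => h.insert td.1 td.2) PySem.Dict.empty).items]) []

-- ===== PRECONDITION & SPEC =====
def Spec_generate_association_hypotheses_py (n_tracks : Int) (n_detections : Int) (valid_pairs : List (Int × Int)) (out : List (List (Int × Int))) : Prop := out = generate_association_hypotheses_py_alt n_tracks n_detections valid_pairs
instance (n_tracks : Int) (n_detections : Int) (valid_pairs : List (Int × Int)) (out : List (List (Int × Int))) : Decidable (Spec_generate_association_hypotheses_py n_tracks n_detections valid_pairs out) := by unfold Spec_generate_association_hypotheses_py; infer_instance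

-- ===== CLAIM (what is proved, stated in full; the proofs are below) =====
def Claim_equal_generate_association_hypotheses_py : Prop := ∀ (n_tracks : Int) (n_detections : Int) (valid_pairs : List (Int × Int)), Dom_generate_association_hypotheses_py n_tracks n_detections valid_pairs → Spec_generate_association_hypotheses_py n_tracks n_detections valid_pairs (generate_association_hypotheses_py n_tracks n_detections valid_pairs)

-- ===== LEMMAS AND PROOFS =====

-- feasibility of a combination: its non-(-1) entries are pairwise distinct
def pvOkR (c : List Int) : Bool := decide ((c.filter (fun d => d != -1)).Nodup)

-- the detection set Source B accumulates for a feasible combination (added right to left)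
def pvSetOf (c : List Int) : List Int := (c.filter (fun d => d != -1)).reverse

-- structural form of the reversed-enumerate foldl: process levels right to left
def pvSweep : List (List Int) → Int → List (List (Int × Int) × PySem.Set Int)
  | [], _ => [([], PySem.Set.empty)]
  | o :: os, i => pvLevel (pvSweep os (i + 1)) (i, o)

theorem pvSweep_eq_foldl (os : List (List Int)) : ∀ (i : Int),
    ((PySem.List.enumerate os i).reverse).foldl pvLevel [([], PySem.Set.empty)] = pvSweep os i := by
  induction os with
  | nil => intro i; simp [PySem.List.enumerate_nil, pvSweep]
  | cons o os ih =>
    intro i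
    rw [PySem.List.enumerate_cons, List.reverse_cons, List.foldl_append, ih (i + 1)]
    rfl

theorem pv_len_ofList_iff (a : List Int) :
    (a.length = (PySem.Set.ofList a).length ↔ a.Nodup) := by
  induction a with
  | nil => simp
  | cons x xs ih =>
    rw [PySem.Set.ofList_cons]
    by_cases hx : x ∈ xs
    · have h1 : (PySem.Set.discard (PySem.Set.ofList xs) x).length < (PySem.Set.ofList xs).length := by
        have hmem : x ∈ PySem.Set.ofList xs := (PySem.Set.mem_ofList xs x).mpr hx
        have : PySem.Set.discard (PySem.Set.ofList xs) x = (PySem.Set.ofList xs).filter (fun y => y != x) := rfl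
        rw [this]
        exact List.length_filter_lt_length_iff_exists.mpr ⟨x, hmem, by simp⟩
      have h2 : (PySem.Set.ofList xs).length ≤ xs.length := PySem.Set.length_ofList_le xs
      constructor
      · intro h; simp at h; omega
      · intro h; simp at h; exact absurd hx h.1
    · have hd : PySem.Set.discard (PySem.Set.ofList xs) x = PySem.Set.ofList xs := by
        have : ∀ y ∈ PySem.Set.ofList xs, y ≠ x := by
          intro y hy hyx; exact hx (hyx ▸ (PySem.Set.mem_ofList xs y).mp hy)
        simp only [PySem.Set.discard]
        exact List.filter_eq_self.mpr (by intro y hy; simpa using this y hy)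
      rw [hd]
      simp only [List.length_cons, List.nodup_cons]
      constructor
      · intro h; exact ⟨hx, ih.mp (by omega)⟩
      · intro h; rw [ih.mpr h.2]

-- the Bool A tests per combination is exactly feasibility
theorem pv_cond_eq_okR (c : List Int) :
    (decide ((c.filter (fun d => d != -1)).length =
      (PySem.Set.ofList (c.filter (fun d => d != -1))).length)) = pvOkR c := by
  unfold pvOkR
  exact decide_eq_decide.mpr (pv_len_ofList_iff _)

theorem pvOkR_cons (d : Int) (c : List Int) :
    pvOkR (d :: c) = (pvOkR c && (d == -1 || !(PySem.Set.contains (pvSetOf c) d))) := by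
  unfold pvOkR pvSetOf
  by_cases hd : d = -1
  · subst hd; simp
  · have hfil : (d :: c).filter (fun x => x != -1) = d :: c.filter (fun x => x != -1) := by
      simp [hd]
    rw [hfil]
    by_cases hm : d ∈ c.filter (fun x => x != -1) <;>
      simp [List.nodup_cons, hm, hd, Bool.and_comm]

-- the suffix sweep enumerates exactly the feasible combinations, in product order
theorem pvSweep_eq (os : List (List Int)) : ∀ (i : Int),
    pvSweep os i = ((pvProd os).filter pvOkR).map
      (fun c => (PySem.List.enumerate c i, pvSetOf c)) := by
  induction os with
  | nil =>
    intro i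
    simp [pvSweep, pvProd, pvOkR, pvSetOf, PySem.List.enumerate_nil, PySem.Set.empty]
  | cons o os ih =>
    intro i
    show pvLevel (pvSweep os (i + 1)) (i, o) = _
    rw [ih (i + 1)]
    unfold pvLevel
    simp only [pvProd, List.filter_flatMap, List.map_flatMap]
    apply List.flatMap_congr
    intro d _
    rw [List.filter_map, List.map_map, List.filter_map, List.map_map, List.filter_filter]
    have hfe : ∀ c, (pvOkR (d :: c)) =
        (pvOkR c && (d == -1 || !(PySem.Set.contains (pvSetOf c) d))) := fun c => pvOkR_cons d c
    have hfilt : ∀ c ∈ pvProd os,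
        (((fun q => d == -1 || !(PySem.Set.contains q.2 d)) ∘ fun c => (PySem.List.enumerate c (i + 1), pvSetOf c)) c && pvOkR c)
          = (pvOkR c && (d == -1 || !(PySem.Set.contains (pvSetOf c) d))) := by
      intro c _
      simp only [Function.comp_apply]
      rw [Bool.and_comm]
    rw [show ((fun c => pvOkR c) ∘ fun c => d :: c) = fun c => pvOkR (d :: c) from rfl,
        List.filter_congr (fun c _ => hfe c), List.filter_congr hfilt]
    apply List.map_congr_left
    intro c hc
    have hcond := List.of_mem_filter hc
    have hcond' : (d == -1 || !(PySem.Set.contains (pvSetOf c) d)) = true :=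
      (Bool.and_eq_true _ _ |>.mp hcond).2
    simp only [Function.comp_apply]
    have hset : (if (d == -1) = true then pvSetOf c else PySem.Set.add (pvSetOf c) d) = pvSetOf (d :: c) := by
      by_cases hd : d = -1
      · subst hd; simp [pvSetOf]
      · have hdm : PySem.Set.contains (pvSetOf c) d = false := by
          rcases Bool.or_eq_true_iff.mp hcond' with h | h
          · exact absurd (by simpa using h) hd
          · simpa using h
        have hnm : d ∉ pvSetOf c := fun hmem => by
          rw [(PySem.Set.contains_iff _ d).mpr hmem] at hdm; cases hdm
        rw [if_neg (by simpa using hd), PySem.Set.add_of_not_mem hnm]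
        unfold pvSetOf
        simp [hd]
    rw [PySem.List.enumerate_cons, hset]

-- a fold of 'd.modify t [] (· ++ [-1])' over keys not containing t leaves getD t unchanged
theorem pv_modify_fold_notmem (l : List Int) : ∀ (d : PySem.Dict Int (List Int)) (t : Int), t ∉ l →
    (l.foldl (fun d t => d.modify t [] (fun l => l ++ [(-1 : Int)])) d).getD t [] = d.getD t [] := by
  induction l with
  | nil => intro d t _; rfl
  | cons x l ih =>
    intro d t ht
    simp only [List.foldl_cons]
    rw [ih _ t (by simp at ht; exact ht.2)]
    rw [PySem.Dict.getD_modify]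
    simp at ht
    rw [if_neg ht.1]

-- … and appends -1 exactly once for a key occurring in a Nodup key list
theorem pv_modify_fold_mem (l : List Int) : ∀ (d : PySem.Dict Int (List Int)) (t : Int), l.Nodup → t ∈ l →
    (l.foldl (fun d t => d.modify t [] (fun l => l ++ [(-1 : Int)])) d).getD t [] = d.getD t [] ++ [-1] := by
  induction l with
  | nil => intro _ _ _ h; exact absurd h (by simp)
  | cons x l ih =>
    intro d t hnd ht
    simp only [List.foldl_cons]
    rcases List.mem_cons.mp ht with h | h
    · subst h
      rw [pv_modify_fold_notmem l _ t (by simp at hnd; exact fun h => (hnd.1 h).elim)]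
      rw [PySem.Dict.getD_modify, if_pos rfl]
    · rw [ih _ t (by simp at hnd; exact hnd.2) h, PySem.Dict.getD_modify,
          if_neg (by simp at hnd; exact fun he => hnd.1 (he ▸ h))]

-- ===== VERDICT (by name: the statement is the Claim_ definition above) =====
theorem generate_association_hypotheses_py_spec : Claim_equal_generate_association_hypotheses_py := by
  unfold Claim_equal_generate_association_hypotheses_py
  intro n_tracks n_detections valid_pairs _
  unfold Spec_generate_association_hypotheses_py
  unfold generate_association_hypotheses_py generate_association_hypotheses_py_alt
  simp only []
  -- the two option lists coincide
  have hopts : (PySem.List.pyRange 0 n_tracks 1).foldl (fun acc t => acc ++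
        [((PySem.List.pyRange 0 n_tracks 1).foldl (fun d t => d.modify t [] (fun l => l ++ [(-1 : Int)]))
          (valid_pairs.foldl (fun d p => d.modify p.1 [] (fun l => l ++ [p.2])) PySem.Dict.empty)).getD t []]) []
      = (PySem.List.pyRange 0 n_tracks 1).map (fun t =>
          (valid_pairs.foldl (fun d p => d.modify p.1 [] (fun l => l ++ [p.2])) PySem.Dict.empty).getD t [] ++ [(-1 : Int)]) := by
    rw [PySem.List.foldl_append_singleton_eq_map, List.nil_append]
    apply List.map_congr_left
    intro t htmem
    exact pv_modify_fold_mem _ _ t (PySem.List.nodup_pyRange_one 0 n_tracks) htmem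
  rw [hopts]
  -- both sides reduce to: map build-dict over the feasible part of the product
  rw [PySem.List.foldl_append_ite
        (p := fun c => ((PySem.Dict.ofList (PySem.List.enumerate c 0)).values.filter (fun d => d != -1)).length
            = ((PySem.Set.ofList ((PySem.Dict.ofList (PySem.List.enumerate c 0)).values.filter (fun d => d != -1))).length))
        (f := fun c => (PySem.Dict.ofList (PySem.List.enumerate c 0)).items),
      List.nil_append,
      PySem.List.foldl_append_singleton_eq_map, List.nil_append,
      pvSweep_eq_foldl _ 0, pvSweep_eq _ 0, List.map_map]
  congr 1
  apply List.filter_congr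
  intro c _
  have hv : (PySem.Dict.ofList (PySem.List.enumerate c 0)).values = c := by
    have hfresh : ∀ a ∈ PySem.List.enumerate c (0 : Int),
        (PySem.Dict.empty : PySem.Dict Int Int).contains a.1 = false := by
      intro a _; simp
    have hnd : ((PySem.List.enumerate c (0 : Int)).map Prod.fst).Nodup := by
      have := PySem.List.map_fst_enumerate c (0 : Int)
      rw [this]
      exact PySem.List.nodup_pyRange_one _ _
    have hit := PySem.Dict.items_foldl_insert_fresh (PySem.List.enumerate c (0 : Int))
        Prod.fst Prod.snd PySem.Dict.empty hfresh hnd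
    have : (PySem.Dict.ofList (PySem.List.enumerate c (0 : Int))).items = PySem.List.enumerate c 0 := by
      have hol : PySem.Dict.ofList (PySem.List.enumerate c (0 : Int))
          = (PySem.List.enumerate c (0 : Int)).foldl (fun d a => d.insert a.1 a.2) PySem.Dict.empty := rfl
      rw [hol, hit]
      have he : (PySem.Dict.empty : PySem.Dict Int Int).items = [] := rfl
      rw [he, List.nil_append]
      simp
    show (PySem.Dict.ofList (PySem.List.enumerate c (0 : Int))).items.map Prod.snd = c
    rw [this]
    exact PySem.List.map_snd_enumerate c 0
  rw [hv]
  exact pv_cond_eq_okR c
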